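-- pv_equiv track=rewrite | github.com/guciek/goraku | jsstrip.py | js_tokens
-- ===== SOURCE A (Python) =====
-- def js_quoted_split(s):
-- 	cur = ''
-- 	quot = ''
-- 	after_backslash = False
-- 	for c in s+' ':
-- 		if quot == '':
-- 			c = ord(c)
-- 			if c == 34 or c == 39 or c == 32 or c == 9 or c == 10 or c == 13:
-- 				if cur != '':
-- 					yield cur
-- 					cur = ''
-- 				if c == 34 or c == 39:
-- 					quot = chr(c)
-- 			elif c >= 33 and c <= 126:
-- 				cur += chr(c)
-- 			else:
-- 				raise Exception("Unknown character %d"%c)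
-- 		else:
-- 			if (c == quot) and (not after_backslash):
-- 				yield quot+cur+quot
-- 				cur = ''
-- 				quot = ''
-- 			else:
-- 				c = ord(c)
-- 				if c == 92:
-- 					after_backslash = not after_backslash
-- 					cur += chr(c)
-- 				elif c >= 32 and c <= 126:
-- 					after_backslash = False
-- 					cur += chr(c)
-- 				else:
-- 					raise Exception("Unexpected character %d in string"%c)
--
-- def js_alnum(c):
-- 	return c.isalnum() or c == '_' or c == '$'
--
-- def js_tokens(s):
-- 	for w in js_quoted_split(s):
-- 		if w[0] == '"' or w[0] == "'":
-- 			yield w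
-- 			continue
-- 		i = 0
-- 		while i < len(w):
-- 			j = i
-- 			while j < len(w) and js_alnum(w[j]):
-- 				j += 1
-- 			if j > i:
-- 				yield w[i:j]
-- 				i = j
-- 				continue
-- 			j = i
-- 			while j < len(w) and (w[j] == '=' or w[j] == '<' or w[j] == '<'):
-- 				j += 1
-- 			if j > i:
-- 				yield w[i:j]
-- 				i = j
-- 				continue
-- 			yield w[i]
-- 			i += 1
-- ===== SOURCE B (Python) =====
-- # One fused character-level scanner: classifies each char (alnum-run / =<-run / single /
-- # whitespace / quote) and accumulates runs directly, instead of first splitting into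
-- # quoted words and then re-scanning each word with a two-pointer index loop.
-- def js_tokens(s):
-- 	buf = ''
-- 	bufcls = None
-- 	quot = ''
-- 	backslash = False
-- 	for c in s + ' ':
-- 		if quot:
-- 			if c == quot and not backslash:
-- 				yield quot + buf + quot
-- 				buf = ''
-- 				quot = ''
-- 			else:
-- 				backslash = (c == '\\') and not backslash
-- 				buf += c
-- 		elif c in ' \t\n\r\'"':
-- 			if buf:
-- 				yield buf
-- 				buf = ''
-- 			bufcls = None
-- 			if c in '\'"':
-- 				quot = c
-- 		else:
-- 			if c.isalnum() or c in '_$':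
-- 				k = 0
-- 			elif c in '=<':
-- 				k = 1
-- 			else:
-- 				k = None
-- 			if k is None:
-- 				if buf:
-- 					yield buf
-- 					buf = ''
-- 				bufcls = None
-- 				yield c
-- 			elif k == bufcls:
-- 				buf += c
-- 			else:
-- 				if buf:
-- 					yield buf
-- 				buf = c
-- 				bufcls = k
-- ===== Notes on version B (the rewrite author's own statement) =====
-- stated objective: faster
-- what changed: Replaces A's two-layer design (a quoted-word splitter generator followed by a per-word two-pointer index scanner) by one fused character-level state machine that classifies each character and accumulates same-class runs directly (constant-factor win: one pass, no intermediate word strings or per-word re-scanning).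
import Mathlib
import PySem

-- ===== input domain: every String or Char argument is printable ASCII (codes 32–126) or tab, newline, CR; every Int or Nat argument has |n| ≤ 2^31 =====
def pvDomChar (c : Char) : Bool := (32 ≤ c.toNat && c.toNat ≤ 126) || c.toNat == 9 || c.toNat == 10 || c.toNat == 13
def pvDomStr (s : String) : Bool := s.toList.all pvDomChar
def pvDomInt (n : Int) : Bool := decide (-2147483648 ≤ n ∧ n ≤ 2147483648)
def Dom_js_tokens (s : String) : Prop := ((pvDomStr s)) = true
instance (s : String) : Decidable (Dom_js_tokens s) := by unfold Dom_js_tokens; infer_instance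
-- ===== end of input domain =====

-- B replaces A's quoted-word splitter + per-word two-pointer scan by one fused
-- character-level state machine (objective: faster by a constant factor, measured).

-- ===== PORT A =====
-- Python js_alnum: c.isalnum() or c == '_' or c == '$'; str.isalnum is exactly
-- [0-9A-Za-z] on the printable-ASCII domain.
def jsAlnum (c : Char) : Bool :=
  (('0' ≤ c && c ≤ '9') || ('A' ≤ c && c ≤ 'Z') || ('a' ≤ c && c ≤ 'z')) || c == '_' || c == '$'

-- js_quoted_split's loop body over s+' ': cur accumulator, quot, after_backslash.
-- Where Python raises an Exception the port returns [] (those inputs are outside Pre_).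
def splitA : List Char → List Char → Option Char → Bool → List (List Char)
  | [], _, _, _ => []
  | c :: rest, cur, none, ab =>
    if c = '"' ∨ c = '\'' ∨ c = ' ' ∨ c = '\t' ∨ c = '\n' ∨ c = '\r' then
      (if cur ≠ [] then [cur] else []) ++
        splitA rest [] (if c = '"' ∨ c = '\'' then some c else none) ab
    else if 33 ≤ c.toNat ∧ c.toNat ≤ 126 then splitA rest (cur ++ [c]) none ab
    else []  -- raise Exception("Unknown character")
  | c :: rest, cur, some q, ab =>
    if c = q ∧ ab = false then (q :: cur ++ [q]) :: splitA rest [] none ab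
    else if c = '\\' then splitA rest (cur ++ [c]) (some q) (!ab)
    else if 32 ≤ c.toNat ∧ c.toNat ≤ 126 then splitA rest (cur ++ [c]) (some q) false
    else []  -- raise Exception("Unexpected character in string")

-- 'while j < len(w) and p(w[j]): j += 1' started at j
def scanWhile (p : Char → Bool) (w : List Char) (j : Nat) : Nat :=
  if h : j < w.length then (if p w[j] then scanWhile p w (j + 1) else j) else j
  termination_by w.length - j
  decreasing_by omega

-- the duplicated test 'w[j] == "=" or w[j] == "<" or w[j] == "<"'
def pyEqLt (c : Char) : Bool := c == '=' || c == '<' || c == '<'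

-- the 'while i < len(w)' loop of js_tokens; w[i:j] = (w.take j).drop i (0 ≤ i ≤ j here)
def wordToksA (w : List Char) (i : Nat) : List (List Char) :=
  if h : i < w.length then
    let j := scanWhile jsAlnum w i
    if hj : i < j then ((w.take j).drop i) :: wordToksA w j
    else
      let j2 := scanWhile pyEqLt w i
      if hj2 : i < j2 then ((w.take j2).drop i) :: wordToksA w j2
      else [w[i]] :: wordToksA w (i + 1)
  else []
  termination_by w.length - i
  decreasing_by all_goals omega

-- the body of js_tokens' outer for-loop (words yielded by js_quoted_split are nonempty,
-- so w[0] is w.head?)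
def tokOfWordA (w : List Char) : List String :=
  if w.head? = some '"' ∨ w.head? = some '\'' then [String.ofList w]
  else (wordToksA w 0).map String.ofList

def js_tokens (s : String) : List String :=
  (splitA (s.toList ++ [' ']) [] none false).flatMap tokOfWordA

-- ===== PORT B =====
-- B's char classifier: some 0 = alnum/_/$ run class, some 1 = [=<] run class, none = single
def clsB (c : Char) : Option Nat :=
  if jsAlnum c then some 0 else if c = '=' ∨ c = '<' then some 1 else none

-- B's single fused loop over s+' ': buf, bufcls, quot, backslash
def jsTokB : List Char → List Char → Option Nat → Option Char → Bool → List String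
  | [], _, _, _, _ => []
  | c :: rest, buf, bc, some q, bs =>
    if c = q ∧ bs = false then
      String.ofList (q :: buf ++ [q]) :: jsTokB rest [] bc none bs
    else jsTokB rest (buf ++ [c]) bc (some q) (c = '\\' && !bs)
  | c :: rest, buf, bc, none, bs =>
    if c = ' ' ∨ c = '\t' ∨ c = '\n' ∨ c = '\r' ∨ c = '\'' ∨ c = '"' then
      (if buf ≠ [] then [String.ofList buf] else []) ++
        jsTokB rest [] none (if c = '\'' ∨ c = '"' then some c else none) bs
    else
      match clsB c with
      | none => (if buf ≠ [] then [String.ofList buf] else []) ++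
          String.ofList [c] :: jsTokB rest [] none none bs
      | some k =>
        if bc = some k then jsTokB rest (buf ++ [c]) bc none bs
        else (if buf ≠ [] then [String.ofList buf] else []) ++ jsTokB rest [c] (some k) none bs

def js_tokens_alt (s : String) : List String :=
  jsTokB (s.toList ++ [' ']) [] none none false

-- ===== PRECONDITION & SPEC =====
-- quote/backslash state scan: true iff A's js_quoted_split raises no Exception
-- (it does NOT tokenize; it only tracks whether each char is legal in its quote state)
def preOk : List Char → Option Char → Bool → Bool
  | [], _, _ => true
  | c :: rest, none, ab =>
    if c = '"' ∨ c = '\'' ∨ c = ' ' ∨ c = '\t' ∨ c = '\n' ∨ c = '\r' then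
      preOk rest (if c = '"' ∨ c = '\'' then some c else none) ab
    else if 33 ≤ c.toNat ∧ c.toNat ≤ 126 then preOk rest none ab
    else false
  | c :: rest, some q, ab =>
    if c = q ∧ ab = false then preOk rest none ab
    else if c = '\\' then preOk rest (some q) (!ab)
    else if 32 ≤ c.toNat ∧ c.toNat ≤ 126 then preOk rest (some q) false
    else false

-- Pre_ excludes exactly the inputs on which A raises: a char below 32 (within Dom: tab,
-- newline, CR) inside a quoted literal, or any char outside 9/10/13/32..126 at all.
def Pre_js_tokens (s : String) : Prop := preOk (s.toList ++ [' ']) none false = true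
instance (s : String) : Decidable (Pre_js_tokens s) := by unfold Pre_js_tokens; infer_instance

def pvWitness_js_tokens : String := "a = 'b c'"

def Spec_js_tokens (s : String) (out : List String) : Prop := out = js_tokens_alt s
instance (s : String) (out : List String) : Decidable (Spec_js_tokens s out) := by
  unfold Spec_js_tokens; infer_instance

-- ===== CLAIM (what is proved, stated in full; the proofs are below) =====
def Claim_equal_js_tokens : Prop :=
  ∀ (s : String), Dom_js_tokens s → Pre_js_tokens s → Spec_js_tokens s (js_tokens s)

-- ===== LEMMAS AND PROOFS =====


-- general takeWhile facts not found in the library (cf. List.takeWhile_prefix)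
theorem take_len_takeWhile (p : Char → Bool) (l : List Char) :
    l.take (l.takeWhile p).length = l.takeWhile p :=
  (List.prefix_iff_eq_take.mp (List.takeWhile_prefix p)).symm

theorem drop_len_takeWhile (p : Char → Bool) (l : List Char) :
    l.drop (l.takeWhile p).length = l.dropWhile p := by
  induction l with
  | nil => rfl
  | cons c cs ih => by_cases h : p c <;> simp [h, ih]

-- reference tokenizer: maximal alnum run / maximal [=<] run / single char
def tok : List Char → List (List Char)
  | [] => []
  | c :: cs =>
    if jsAlnum c then (c :: cs.takeWhile jsAlnum) :: tok (cs.dropWhile jsAlnum)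
    else if pyEqLt c then (c :: cs.takeWhile pyEqLt) :: tok (cs.dropWhile pyEqLt)
    else [c] :: tok cs
  termination_by l => l.length
  decreasing_by
    · have := List.length_dropWhile_le (p := jsAlnum) (l := cs)
      simp
      omega
    · have := List.length_dropWhile_le (p := pyEqLt) (l := cs)
      simp
      omega
    · simp

theorem scanWhile_eq (p : Char → Bool) (w : List Char) (j : Nat) :
    scanWhile p w j = j + ((w.drop j).takeWhile p).length := by
  fun_induction scanWhile p w j with
  | case1 j h hp ih =>
    rw [List.drop_eq_getElem_cons h, List.takeWhile_cons, if_pos hp, ih]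
    simp
    omega
  | case2 j h hp =>
    rw [List.drop_eq_getElem_cons h, List.takeWhile_cons, if_neg (by simp [hp])]
    simp
  | case3 j h =>
    have : w.drop j = [] := List.drop_eq_nil_of_le (by omega)
    simp [this]

-- scanWhile started on a satisfying char moves strictly right
theorem scanWhile_gt (p : Char → Bool) (w : List Char) (i : Nat) (h : i < w.length)
    (hp : p w[i] = true) : i < scanWhile p w i := by
  rw [scanWhile]
  simp only [h, dif_pos, hp, if_pos]
  have := scanWhile_eq p w (i + 1)
  omega

theorem wordToksA_eq_tok (w : List Char) (i : Nat) : wordToksA w i = tok (w.drop i) := by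
  fun_induction wordToksA w i with
  | case1 i h j hj ih =>
    have hjeq : j = i + ((w.drop i).takeWhile jsAlnum).length := scanWhile_eq jsAlnum w i
    have hd : w.drop i = w[i] :: w.drop (i + 1) := List.drop_eq_getElem_cons h
    have hp : jsAlnum w[i] = true := by
      by_contra hnp
      have hj2 : i < scanWhile jsAlnum w i := hj
      rw [scanWhile] at hj2
      simp [h, hnp] at hj2
    have htok : tok (w.drop i) =
        ((w.drop i).takeWhile jsAlnum) :: tok ((w.drop i).dropWhile jsAlnum) := by
      rw [hd, tok, List.takeWhile_cons, List.dropWhile_cons]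
      rw [if_pos hp, if_pos hp, if_pos hp]
    have h1 : (w.take j).drop i = (w.drop i).takeWhile jsAlnum := by
      rw [hjeq, ← List.take_drop, take_len_takeWhile]
    have h2 : w.drop j = (w.drop i).dropWhile jsAlnum := by
      rw [hjeq, ← List.drop_drop, drop_len_takeWhile]
    rw [h1, ih, h2, htok]
  | case2 i h j hj j2 hj2 ih =>
    have hjeq : j2 = i + ((w.drop i).takeWhile pyEqLt).length := scanWhile_eq pyEqLt w i
    have hd : w.drop i = w[i] :: w.drop (i + 1) := List.drop_eq_getElem_cons h
    have hnp : ¬ jsAlnum w[i] = true := fun hp => hj (scanWhile_gt jsAlnum w i h hp)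
    have hp : pyEqLt w[i] = true := by
      by_contra hq
      have h2 : i < scanWhile pyEqLt w i := hj2
      rw [scanWhile] at h2
      simp [h, hq] at h2
    have htok : tok (w.drop i) =
        ((w.drop i).takeWhile pyEqLt) :: tok ((w.drop i).dropWhile pyEqLt) := by
      rw [hd, tok, List.takeWhile_cons, List.dropWhile_cons]
      rw [if_neg hnp, if_pos hp, if_pos hp, if_pos hp]
    have h1 : (w.take j2).drop i = (w.drop i).takeWhile pyEqLt := by
      rw [hjeq, ← List.take_drop, take_len_takeWhile]
    have h2 : w.drop j2 = (w.drop i).dropWhile pyEqLt := by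
      rw [hjeq, ← List.drop_drop, drop_len_takeWhile]
    rw [h1, ih, h2, htok]
  | case3 i h j hj j2 hj2 ih =>
    have hd : w.drop i = w[i] :: w.drop (i + 1) := List.drop_eq_getElem_cons h
    have hnp : ¬ jsAlnum w[i] = true := fun hp => hj (scanWhile_gt jsAlnum w i h hp)
    have hnq : ¬ pyEqLt w[i] = true := fun hp => hj2 (scanWhile_gt pyEqLt w i h hp)
    rw [ih, hd, tok]
    rw [if_neg hnp, if_neg hnq]
  | case4 i h =>
    have : w.drop i = [] := List.drop_eq_nil_of_le (by omega)
    simp [this, tok]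



theorem toNat_inj_char (c d : Char) (h : c.toNat = d.toNat) : c = d := by
  have hv : c.val = d.val := by
    unfold Char.toNat at h
    exact UInt32.toNat_inj.mp h
  exact Char.ext hv

theorem alnum_not_eqlt (c : Char) (h : jsAlnum c = true) : pyEqLt c = false := by
  by_contra hb
  simp only [Bool.not_eq_false, pyEqLt, Bool.or_eq_true, beq_iff_eq] at hb
  rcases hb with (rfl | rfl) | rfl <;> revert h <;> decide

theorem clsB_none (c : Char) (h : clsB c = none) : jsAlnum c = false ∧ pyEqLt c = false := by
  unfold clsB at h
  by_cases ha : jsAlnum c = true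
  · simp [ha] at h
  · by_cases hb : c = '=' ∨ c = '<'
    · simp [ha, hb] at h
    · have h1 : c ≠ '=' := fun hx => hb (Or.inl hx)
      have h2 : c ≠ '<' := fun hx => hb (Or.inr hx)
      exact ⟨by simpa using ha, by simp [pyEqLt, h1, h2]⟩

theorem clsB_some (c : Char) (k : Nat) (h : clsB c = some k) :
    (k = 0 ∧ jsAlnum c = true) ∨ (k = 1 ∧ jsAlnum c = false ∧ pyEqLt c = true) := by
  unfold clsB at h
  by_cases ha : jsAlnum c = true
  · simp [ha] at h
    exact Or.inl ⟨h.symm, ha⟩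
  · simp [ha] at h
    by_cases hb : c = '=' ∨ c = '<'
    · simp [hb] at h
      refine Or.inr ⟨h.symm, by simpa using ha, ?_⟩
      rcases hb with rfl | rfl <;> decide
    · simp [hb] at h

-- a nonempty run of one mergeable class is a single token
theorem tok_run (r : List Char) (k : Nat) (hne : r ≠ [])
    (hrun : ∀ c ∈ r, clsB c = some k) : tok r = [r] := by
  obtain ⟨c, r', rfl⟩ := List.exists_cons_of_ne_nil hne
  rcases clsB_some c k (hrun c (by simp)) with ⟨hk, hc⟩ | ⟨hk, hc1, hc2⟩
  · subst hk
    have hall : ∀ x ∈ r', jsAlnum x = true := fun x hx =>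
      ((clsB_some x 0 (hrun x (by simp [hx]))).resolve_right (by simp)).2
    rw [tok, if_pos hc, List.takeWhile_eq_self_iff.mpr hall,
      List.dropWhile_eq_nil_iff.mpr hall, tok]
  · subst hk
    have hall : ∀ x ∈ r', pyEqLt x = true := fun x hx =>
      ((clsB_some x 1 (hrun x (by simp [hx]))).resolve_left (by simp)).2.2
    rw [tok, if_neg (by simp [hc1]), if_pos hc2, List.takeWhile_eq_self_iff.mpr hall,
      List.dropWhile_eq_nil_iff.mpr hall, tok]

theorem getLast?_cons_of_ne_nil (c : Char) (cs : List Char) (h : cs ≠ []) :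
    (c :: cs).getLast? = cs.getLast? := List.getLast?_append_of_ne_nil [c] h

theorem getLast?_dropWhile (p : Char → Bool) (cs : List Char)
    (h : cs.dropWhile p ≠ []) : (cs.dropWhile p).getLast? = cs.getLast? := by
  obtain ⟨t, ht⟩ := List.dropWhile_suffix (l := cs) p
  conv_rhs => rw [← ht]
  exact (List.getLast?_append_of_ne_nil t h).symm

theorem dropWhile_ne_nil_of_len (p : Char → Bool) (cs : List Char)
    (h : ¬ (cs.takeWhile p).length = cs.length) : cs.dropWhile p ≠ [] := by
  intro hnil
  have := List.takeWhile_append_dropWhile (p := p) (l := cs)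
  rw [hnil, List.append_nil] at this
  exact h (by rw [this])

-- appending a maximal run at a class boundary appends one token
theorem tok_append_run (x r : List Char) (k : Nat) (hne : r ≠ [])
    (hrun : ∀ c ∈ r, clsB c = some k) :
    (∀ d, x.getLast? = some d → clsB d ≠ some k) → tok (x ++ r) = tok x ++ [r] := by
  obtain ⟨c0, r0, rfl⟩ := List.exists_cons_of_ne_nil hne
  induction x using tok.induct with
  | case1 =>
    intro _
    simpa [tok] using tok_run (c0 :: r0) k hne hrun
  | case2 c cs hp ih =>
    intro hb
    by_cases hall : (cs.takeWhile jsAlnum).length = cs.length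
    · have hcs : cs.takeWhile jsAlnum = cs := (List.takeWhile_prefix jsAlnum).eq_of_length hall
      have hcsall : ∀ x ∈ cs, jsAlnum x = true := List.takeWhile_eq_self_iff.mp hcs
      -- the last char of c :: cs is alnum, so k ≠ 0, hence k = 1 and r's head is not alnum
      obtain ⟨d, hd⟩ : ∃ d, (c :: cs).getLast? = some d :=
        Option.isSome_iff_exists.mp (by simp)
      have hda : jsAlnum d = true := by
        rcases List.mem_cons.mp (List.mem_of_getLast? hd) with rfl | h
        · exact hp
        · exact hcsall d h
      have hk : k = 1 := by
        have h0 : clsB d = some 0 := by simp [clsB, hda]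
        have hne0 := hb d hd
        rcases clsB_some c0 k (hrun c0 (by simp)) with ⟨hk0, _⟩ | ⟨hk1, _⟩
        · exact absurd h0 (hk0 ▸ hne0)
        · exact hk1
      have hc0 : jsAlnum c0 = false :=
        ((clsB_some c0 k (hrun c0 (by simp))).resolve_left (by omega)).2.1
      have h1 : (cs ++ c0 :: r0).takeWhile jsAlnum = cs := by
        rw [List.takeWhile_append, if_pos hall, List.takeWhile_cons,
          if_neg (by simp [hc0]), List.append_nil]
      have h2 : (cs ++ c0 :: r0).dropWhile jsAlnum = c0 :: r0 := by
        rw [List.dropWhile_append, if_pos (by simp [List.dropWhile_eq_nil_iff.mpr hcsall]),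
          List.dropWhile_cons, if_neg (by simp [hc0])]
      rw [List.cons_append, tok, if_pos hp, h1, h2, tok_run (c0 :: r0) k hne hrun,
        tok, if_pos hp, hcs, List.dropWhile_eq_nil_iff.mpr hcsall, tok]
      simp
    · have hdw : cs.dropWhile jsAlnum ≠ [] := dropWhile_ne_nil_of_len _ _ hall
      have hcsn : cs ≠ [] := by
        intro h
        exact hdw (by simp [h])
      have hb' : ∀ d, (cs.dropWhile jsAlnum).getLast? = some d → clsB d ≠ some k := by
        intro d hd
        refine hb d ?_
        rw [getLast?_cons_of_ne_nil c cs hcsn, ← getLast?_dropWhile jsAlnum cs hdw]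
        exact hd
      rw [List.cons_append, tok, if_pos hp,
        List.takeWhile_append, if_neg hall, List.dropWhile_append,
        if_neg (by simpa using hdw), ih hb', tok, if_pos hp]
      simp
  | case3 c cs hp hq ih =>
    intro hb
    by_cases hall : (cs.takeWhile pyEqLt).length = cs.length
    · have hcs : cs.takeWhile pyEqLt = cs := (List.takeWhile_prefix pyEqLt).eq_of_length hall
      have hcsall : ∀ x ∈ cs, pyEqLt x = true := List.takeWhile_eq_self_iff.mp hcs
      obtain ⟨d, hd⟩ : ∃ d, (c :: cs).getLast? = some d :=
        Option.isSome_iff_exists.mp (by simp)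
      have hde : pyEqLt d = true := by
        rcases List.mem_cons.mp (List.mem_of_getLast? hd) with rfl | h
        · exact hq
        · exact hcsall d h
      have hda : jsAlnum d = false := by
        by_contra hx
        simp only [Bool.not_eq_false] at hx
        rw [alnum_not_eqlt d hx] at hde
        exact Bool.false_ne_true hde
      have hk : k = 0 := by
        have h1 : clsB d = some 1 := by
          have : d = '=' ∨ d = '<' := by
            simpa [pyEqLt] using hde
          simp [clsB, hda, this]
        have hne1 := hb d hd
        rcases clsB_some c0 k (hrun c0 (by simp)) with ⟨hk0, _⟩ | ⟨hk1, _⟩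
        · exact hk0
        · exact absurd h1 (hk1 ▸ hne1)
      have hc0a : jsAlnum c0 = true :=
        ((clsB_some c0 k (hrun c0 (by simp))).resolve_right (by omega)).2
      have hc0 : pyEqLt c0 = false := alnum_not_eqlt c0 hc0a
      have h1 : (cs ++ c0 :: r0).takeWhile pyEqLt = cs := by
        rw [List.takeWhile_append, if_pos hall, List.takeWhile_cons,
          if_neg (by simp [hc0]), List.append_nil]
      have h2 : (cs ++ c0 :: r0).dropWhile pyEqLt = c0 :: r0 := by
        rw [List.dropWhile_append, if_pos (by simp [List.dropWhile_eq_nil_iff.mpr hcsall]),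
          List.dropWhile_cons, if_neg (by simp [hc0])]
      rw [List.cons_append, tok, if_neg (by simp [hp]), if_pos hq, h1, h2,
        tok_run (c0 :: r0) k hne hrun,
        tok, if_neg (by simp [hp]), if_pos hq, hcs,
        List.dropWhile_eq_nil_iff.mpr hcsall, tok]
      simp
    · have hdw : cs.dropWhile pyEqLt ≠ [] := dropWhile_ne_nil_of_len _ _ hall
      have hcsn : cs ≠ [] := by
        intro h
        exact hdw (by simp [h])
      have hb' : ∀ d, (cs.dropWhile pyEqLt).getLast? = some d → clsB d ≠ some k := by
        intro d hd
        refine hb d ?_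
        rw [getLast?_cons_of_ne_nil c cs hcsn, ← getLast?_dropWhile pyEqLt cs hdw]
        exact hd
      rw [List.cons_append, tok, if_neg (by simp [hp]), if_pos hq,
        List.takeWhile_append, if_neg hall, List.dropWhile_append,
        if_neg (by simpa using hdw), ih hb', tok, if_neg (by simp [hp]), if_pos hq]
      simp
  | case4 c cs hp hq ih =>
    intro hb
    have hb' : ∀ d, cs.getLast? = some d → clsB d ≠ some k := by
      intro d hd
      have hcsn : cs ≠ [] := by
        intro hx
        rw [hx] at hd
        simp at hd
      refine hb d ?_
      rw [getLast?_cons_of_ne_nil c cs hcsn]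
      exact hd
    rw [List.cons_append, tok, if_neg (by simp [hp]), if_neg (by simp [hq]), ih hb', tok,
      if_neg (by simp [hp]), if_neg (by simp [hq])]
    simp

-- appending a single non-mergeable char appends a singleton token
theorem tok_append_single (x : List Char) (c : Char) (hc : clsB c = none) :
    tok (x ++ [c]) = tok x ++ [[c]] := by
  obtain ⟨hA, hE⟩ := clsB_none c hc
  have htc : tok [c] = [[c]] := by
    rw [tok, if_neg (by simp [hA]), if_neg (by simp [hE]), tok]
  induction x using tok.induct with
  | case1 =>
    rw [List.nil_append, htc, tok]
    simp
  | case2 a cs hp ih =>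
    by_cases hall : (cs.takeWhile jsAlnum).length = cs.length
    · have hcs : cs.takeWhile jsAlnum = cs := (List.takeWhile_prefix jsAlnum).eq_of_length hall
      have hcsall : ∀ x ∈ cs, jsAlnum x = true := List.takeWhile_eq_self_iff.mp hcs
      have h1 : (cs ++ [c]).takeWhile jsAlnum = cs := by
        rw [List.takeWhile_append, if_pos hall, List.takeWhile_cons,
          if_neg (by simp [hA]), List.append_nil]
      have h2 : (cs ++ [c]).dropWhile jsAlnum = [c] := by
        rw [List.dropWhile_append, if_pos (by simp [List.dropWhile_eq_nil_iff.mpr hcsall]),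
          List.dropWhile_cons, if_neg (by simp [hA])]
      rw [List.cons_append, tok, if_pos hp, h1, h2, htc,
        tok, if_pos hp, hcs, List.dropWhile_eq_nil_iff.mpr hcsall, tok]
      simp
    · have hdw : cs.dropWhile jsAlnum ≠ [] := dropWhile_ne_nil_of_len _ _ hall
      rw [List.cons_append, tok, if_pos hp,
        List.takeWhile_append, if_neg hall, List.dropWhile_append,
        if_neg (by simpa using hdw), ih, tok, if_pos hp]
      simp
  | case3 a cs hp hq ih =>
    by_cases hall : (cs.takeWhile pyEqLt).length = cs.length
    · have hcs : cs.takeWhile pyEqLt = cs := (List.takeWhile_prefix pyEqLt).eq_of_length hall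
      have hcsall : ∀ x ∈ cs, pyEqLt x = true := List.takeWhile_eq_self_iff.mp hcs
      have h1 : (cs ++ [c]).takeWhile pyEqLt = cs := by
        rw [List.takeWhile_append, if_pos hall, List.takeWhile_cons,
          if_neg (by simp [hE]), List.append_nil]
      have h2 : (cs ++ [c]).dropWhile pyEqLt = [c] := by
        rw [List.dropWhile_append, if_pos (by simp [List.dropWhile_eq_nil_iff.mpr hcsall]),
          List.dropWhile_cons, if_neg (by simp [hE])]
      rw [List.cons_append, tok, if_neg (by simp [hp]), if_pos hq, h1, h2, htc,
        tok, if_neg (by simp [hp]), if_pos hq, hcs,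
        List.dropWhile_eq_nil_iff.mpr hcsall, tok]
      simp
    · have hdw : cs.dropWhile pyEqLt ≠ [] := dropWhile_ne_nil_of_len _ _ hall
      rw [List.cons_append, tok, if_neg (by simp [hp]), if_pos hq,
        List.takeWhile_append, if_neg hall, List.dropWhile_append,
        if_neg (by simpa using hdw), ih, tok, if_neg (by simp [hp]), if_pos hq]
      simp
  | case4 a cs hp hq ih =>
    rw [List.cons_append, tok, if_neg (by simp [hp]), if_neg (by simp [hq]), ih, tok,
      if_neg (by simp [hp]), if_neg (by simp [hq])]
    simp

theorem tok_nil : tok [] = [] := by rw [tok]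

def wordChar (c : Char) : Prop := 33 ≤ c.toNat ∧ c.toNat ≤ 126 ∧ c ≠ '"' ∧ c ≠ '\''

-- invariant tying A's pending word cur = p ++ buf to B's run buffer buf of class bc:
-- B has already emitted the tokens of p, and buf is a run that cannot merge leftwards
def bufInv (p buf : List Char) (bc : Option Nat) : Prop :=
  (buf = [] ∧ (p = [] ∨ ∃ d, p.getLast? = some d ∧ clsB d = none)) ∨
  (∃ k, bc = some k ∧ buf ≠ [] ∧ (∀ c ∈ buf, clsB c = some k) ∧
    (p = [] ∨ ∃ d, p.getLast? = some d ∧ clsB d ≠ some k))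

theorem tok_flush (p buf : List Char) (bc : Option Nat) (h : bufInv p buf bc) :
    (tok (p ++ buf)).map String.ofList
      = (tok p).map String.ofList ++ (if buf ≠ [] then [String.ofList buf] else []) := by
  rcases h with ⟨rfl, _⟩ | ⟨k, _, hne, hrun, hbd⟩
  · simp
  · have hb : ∀ d, p.getLast? = some d → clsB d ≠ some k := by
      intro d hd
      rcases hbd with rfl | ⟨d', hd', hcl⟩
      · simp at hd
      · rw [hd'] at hd
        exact (Option.some_inj.mp hd) ▸ hcl
    rw [tok_append_run p buf k hne hrun hb]
    simp [hne]

theorem tokOfWordA_word (w : List Char) (hw : ∀ c ∈ w, wordChar c) :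
    tokOfWordA w = (tok w).map String.ofList := by
  cases w with
  | nil =>
    rw [tokOfWordA, if_neg (by simp), wordToksA_eq_tok]
    simp
  | cons a l =>
    obtain ⟨_, _, hq1, hq2⟩ := hw a (by simp)
    rw [tokOfWordA, if_neg (by simp [hq1, hq2]), wordToksA_eq_tok]
    simp

theorem tokOfWordA_quoted (q : Char) (cur : List Char) (h : q = '"' ∨ q = '\'') :
    tokOfWordA (q :: cur ++ [q]) = [String.ofList (q :: cur ++ [q])] := by
  rcases h with rfl | rfl <;> simp [tokOfWordA]

theorem guard_flatMap (cur : List Char) (hwc : ∀ c ∈ cur, wordChar c) :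
    ((if cur ≠ [] then [cur] else []).flatMap tokOfWordA) = (tok cur).map String.ofList := by
  by_cases hc : cur = []
  · subst hc
    rw [if_neg (by simp), tok]
    simp
  · rw [if_pos hc]
    simp [tokOfWordA_word cur hwc]

theorem char_of_toNat_9 (c : Char) (h : c.toNat = 9) : c = '\t' := toNat_inj_char c '\t' (by rw [h]; rfl)
theorem char_of_toNat_10 (c : Char) (h : c.toNat = 10) : c = '\n' := toNat_inj_char c '\n' (by rw [h]; rfl)
theorem char_of_toNat_13 (c : Char) (h : c.toNat = 13) : c = '\r' := toNat_inj_char c '\r' (by rw [h]; rfl)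
theorem char_of_toNat_32 (c : Char) (h : c.toNat = 32) : c = ' ' := toNat_inj_char c ' ' (by rw [h]; rfl)

theorem splitA_eq_tokB :
    ∀ (l cur p buf : List Char) (bc : Option Nat) (q : Option Char) (ab : Bool),
    (∀ c ∈ l, pvDomChar c = true) →
    preOk (l ++ [' ']) q ab = true →
    (q = none → cur = p ++ buf ∧ (∀ c ∈ cur, wordChar c) ∧ bufInv p buf bc) →
    (∀ qq, q = some qq → buf = cur ∧ (qq = '"' ∨ qq = '\'')) →
    (splitA (l ++ [' ']) cur q ab).flatMap tokOfWordA
      = (if q = none then (tok p).map String.ofList else []) ++ jsTokB (l ++ [' ']) buf bc q ab := by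
  intro l
  induction l with
  | nil =>
    intro cur p buf bc q ab hdom hpre hn hq
    cases q with
    | none =>
      obtain ⟨hcur, hwc, hinv⟩ := hn rfl
      rw [List.nil_append, splitA,
        if_pos (show (' ' = '"' ∨ ' ' = '\'' ∨ ' ' = ' ' ∨ ' ' = '\t' ∨ ' ' = '\n' ∨ ' ' = '\r') by decide),
        if_neg (show ¬(' ' = '"' ∨ ' ' = '\'') by decide),
        jsTokB,
        if_pos (show (' ' = ' ' ∨ ' ' = '\t' ∨ ' ' = '\n' ∨ ' ' = '\r' ∨ ' ' = '\'' ∨ ' ' = '"') by decide),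
        if_neg (show ¬(' ' = '\'' ∨ ' ' = '"') by decide),
        splitA, jsTokB]
      rw [List.flatMap_append, guard_flatMap cur hwc, hcur, tok_flush p buf bc hinv]
      simp
    | some qq =>
      obtain ⟨hbufcur, hqq⟩ := hq qq rfl
      have hne : ¬(' ' = qq ∧ ab = false) := by
        rcases hqq with rfl | rfl <;> simp
      rw [List.nil_append, splitA, if_neg hne, if_neg (by decide), if_pos (by decide),
        jsTokB, if_neg hne, splitA, jsTokB]
      simp
  | cons c rest ih =>
    intro cur p buf bc q ab hdom hpre hn hq
    have hcdom : pvDomChar c = true := hdom c (by simp)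
    have hdomr : ∀ c' ∈ rest, pvDomChar c' = true := fun c' h => hdom c' (by simp [h])
    rw [List.cons_append] at hpre ⊢
    cases q with
    | some qq =>
      obtain ⟨hbufcur, hqq⟩ := hq qq rfl
      by_cases hclose : c = qq ∧ ab = false
      · rw [splitA, if_pos hclose, jsTokB, if_pos hclose]
        rw [preOk, if_pos hclose] at hpre
        have hIH := ih [] [] [] bc none ab hdomr hpre
          (fun _ => ⟨rfl, by simp, Or.inl ⟨rfl, Or.inl rfl⟩⟩) (fun qq h => by simp at h)
        simp only [List.flatMap_cons, tokOfWordA_quoted qq cur hqq, hIH, hbufcur, tok_nil]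
        simp
      · rw [preOk, if_neg hclose] at hpre
        by_cases hbs : c = '\\'
        · rw [if_pos hbs] at hpre
          have hb2 : (decide (c = '\\') && !ab) = !ab := by simp [hbs]
          rw [splitA, if_neg hclose, if_pos hbs, jsTokB, if_neg hclose, hb2]
          exact ih (cur ++ [c]) p (buf ++ [c]) bc (some qq) (!ab) hdomr hpre
            (fun h => by simp at h) (fun qq' h => ⟨by rw [hbufcur], by injection h with h2; exact h2 ▸ hqq⟩)
        · rw [if_neg hbs] at hpre
          by_cases h32 : 32 ≤ c.toNat ∧ c.toNat ≤ 126
          · rw [if_pos h32] at hpre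
            have hb2 : (decide (c = '\\') && !ab) = false := by simp [hbs]
            rw [splitA, if_neg hclose, if_neg hbs, if_pos h32, jsTokB, if_neg hclose, hb2]
            exact ih (cur ++ [c]) p (buf ++ [c]) bc (some qq) false hdomr hpre
              (fun h => by simp at h) (fun qq' h => ⟨by rw [hbufcur], by injection h with h2; exact h2 ▸ hqq⟩)
          · rw [if_neg h32] at hpre
            exact absurd hpre (by simp)
    | none =>
      obtain ⟨hcur, hwc, hinv⟩ := hn rfl
      by_cases hq2 : c = '"' ∨ c = '\''
      · -- quote opens: both sides flush cur/buf and enter quote mode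
        have hSA : c = '"' ∨ c = '\'' ∨ c = ' ' ∨ c = '\t' ∨ c = '\n' ∨ c = '\r' := by tauto
        have hSB : c = ' ' ∨ c = '\t' ∨ c = '\n' ∨ c = '\r' ∨ c = '\'' ∨ c = '"' := by tauto
        have hQB : c = '\'' ∨ c = '"' := by tauto
        rw [splitA, if_pos hSA, if_pos hq2, jsTokB, if_pos hSB, if_pos hQB]
        rw [preOk, if_pos hSA, if_pos hq2] at hpre
        have hIH := ih [] [] [] none (some c) ab hdomr hpre (fun h => by simp at h)
          (fun qq h => ⟨rfl, by injection h with h2; exact h2 ▸ hq2⟩)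
        simp only [List.flatMap_append, guard_flatMap cur hwc, hIH]
        rw [hcur, tok_flush p buf bc hinv]
        simp
      · by_cases hws : c = ' ' ∨ c = '\t' ∨ c = '\n' ∨ c = '\r'
        · -- whitespace: both sides flush
          have hSA : c = '"' ∨ c = '\'' ∨ c = ' ' ∨ c = '\t' ∨ c = '\n' ∨ c = '\r' := by tauto
          have hSB : c = ' ' ∨ c = '\t' ∨ c = '\n' ∨ c = '\r' ∨ c = '\'' ∨ c = '"' := by tauto
          have hQB : ¬(c = '\'' ∨ c = '"') := by tauto
          rw [splitA, if_pos hSA, if_neg hq2, jsTokB, if_pos hSB, if_neg hQB]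
          rw [preOk, if_pos hSA, if_neg hq2] at hpre
          have hIH := ih [] [] [] none none ab hdomr hpre
            (fun _ => ⟨rfl, by simp, Or.inl ⟨rfl, Or.inl rfl⟩⟩) (fun qq h => by simp at h)
          simp only [List.flatMap_append, guard_flatMap cur hwc, hIH]
          rw [hcur, tok_flush p buf bc hinv, tok_nil]
          simp
        · -- a word character
          have hq2a : c ≠ '"' := fun h => hq2 (Or.inl h)
          have hq2b : c ≠ '\'' := fun h => hq2 (Or.inr h)
          have hw1 : c ≠ ' ' := fun h => hws (Or.inl h)
          have hw2 : c ≠ '\t' := fun h => hws (Or.inr (Or.inl h))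
          have hw3 : c ≠ '\n' := fun h => hws (Or.inr (Or.inr (Or.inl h)))
          have hw4 : c ≠ '\r' := fun h => hws (Or.inr (Or.inr (Or.inr h)))
          have h33 : 33 ≤ c.toNat ∧ c.toNat ≤ 126 := by
            have h9 : c.toNat ≠ 9 := fun h => hw2 (char_of_toNat_9 c h)
            have h10 : c.toNat ≠ 10 := fun h => hw3 (char_of_toNat_10 c h)
            have h13 : c.toNat ≠ 13 := fun h => hw4 (char_of_toNat_13 c h)
            have h32 : c.toNat ≠ 32 := fun h => hw1 (char_of_toNat_32 c h)
            unfold pvDomChar at hcdom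
            simp only [Bool.or_eq_true, Bool.and_eq_true, decide_eq_true_eq,
              beq_iff_eq] at hcdom
            omega
          have hwcc : wordChar c := ⟨h33.1, h33.2, hq2a, hq2b⟩
          have hSA : ¬(c = '"' ∨ c = '\'' ∨ c = ' ' ∨ c = '\t' ∨ c = '\n' ∨ c = '\r') := by tauto
          have hSB : ¬(c = ' ' ∨ c = '\t' ∨ c = '\n' ∨ c = '\r' ∨ c = '\'' ∨ c = '"') := by tauto
          rw [splitA, if_neg hSA, if_pos h33, jsTokB, if_neg hSB]
          rw [preOk, if_neg hSA, if_pos h33] at hpre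
          have hwc' : ∀ x ∈ cur ++ [c], wordChar x := by
            intro x hx
            rcases List.mem_append.mp hx with h | h
            · exact hwc x h
            · simp at h
              exact h ▸ hwcc
          cases hcl : clsB c with
          | none =>
            dsimp only
            -- non-mergeable char: B flushes and emits it singly
            have hIH := ih (cur ++ [c]) (cur ++ [c]) [] none none ab hdomr hpre
              (fun _ => ⟨by simp, hwc', Or.inl ⟨rfl, Or.inr ⟨c, List.getLast?_concat, hcl⟩⟩⟩)
              (fun qq h => by simp at h)
            rw [hIH, hcur, ← List.append_assoc, tok_append_single (p ++ buf) c hcl]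
            rw [List.map_append, tok_flush p buf bc hinv]
            simp
          | some k =>
            dsimp only
            by_cases hbck : bc = some k
            · -- same class: B extends its buffer
              have hinv' : bufInv p (buf ++ [c]) bc := by
                rcases hinv with ⟨rfl, hp0⟩ | ⟨k', hbc', hne, hrun, hbd⟩
                · refine Or.inr ⟨k, hbck, by simp, ?_, ?_⟩
                  · intro x hx
                    simp at hx
                    exact hx ▸ hcl
                  · rcases hp0 with rfl | ⟨d, hd, hdn⟩
                    · exact Or.inl rfl
                    · exact Or.inr ⟨d, hd, by rw [hdn]; simp⟩
                · have hkk : k' = k := by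
                    rw [hbck] at hbc'
                    exact (Option.some_inj.mp hbc').symm
                  refine Or.inr ⟨k, hbck, by simp, ?_, ?_⟩
                  · intro x hx
                    rcases List.mem_append.mp hx with h | h
                    · rw [hrun x h, hkk]
                    · simp at h
                      exact h ▸ hcl
                  · rcases hbd with h | ⟨d, hd, hdn⟩
                    · exact Or.inl h
                    · exact Or.inr ⟨d, hd, by rw [← hkk]; exact hdn⟩
              have hIH := ih (cur ++ [c]) p (buf ++ [c]) bc none ab hdomr hpre
                (fun _ => ⟨by rw [hcur, List.append_assoc], hwc', hinv'⟩)
                (fun qq h => by simp at h)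
              rw [if_pos hbck, hIH]
            · -- class switch: B flushes its buffer and starts a new run
              have hinv' : bufInv (p ++ buf) [c] (some k) := by
                refine Or.inr ⟨k, rfl, by simp, by intro x hx; simp at hx; exact hx ▸ hcl, ?_⟩
                rcases hinv with ⟨rfl, hp0⟩ | ⟨k', hbc', hne, hrun, hbd⟩
                · rcases hp0 with rfl | ⟨d, hd, hdn⟩
                  · exact Or.inl rfl
                  · exact Or.inr ⟨d, by simpa using hd, by rw [hdn]; simp⟩
                · have hk' : k' ≠ k := fun h => hbck (h ▸ hbc')
                  obtain ⟨d, hd⟩ : ∃ d, buf.getLast? = some d :=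
                    Option.isSome_iff_exists.mp (by simp [hne])
                  refine Or.inr ⟨d, ?_, ?_⟩
                  · rw [List.getLast?_append_of_ne_nil p hne]
                    exact hd
                  · rw [hrun d (List.mem_of_getLast? hd)]
                    simp [hk']
              have hIH := ih (cur ++ [c]) (p ++ buf) [c] (some k) none ab hdomr hpre
                (fun _ => ⟨by rw [hcur, List.append_assoc], hwc', hinv'⟩)
                (fun qq h => by simp at h)
              rw [if_neg hbck, hIH, tok_flush p buf bc hinv]
              simp

-- ===== VERDICT (by name: the statement is the Claim_ definition above) =====
theorem js_tokens_spec : Claim_equal_js_tokens := by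
  intro s hdom hpre
  unfold Spec_js_tokens js_tokens js_tokens_alt
  have hdom' : ∀ c ∈ s.toList, pvDomChar c = true := by
    intro c hc
    have h := hdom
    unfold Dom_js_tokens pvDomStr at h
    exact List.all_eq_true.mp h c hc
  have h := splitA_eq_tokB s.toList [] [] [] none none false hdom' hpre
    (fun _ => ⟨rfl, by simp, Or.inl ⟨rfl, Or.inl rfl⟩⟩) (fun qq h => by simp at h)
  rw [h, tok_nil]
  simp
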